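-- pv_equiv track=rewrite | github.com/KardelRuveyda/uretken-yapayzeka-chatbot-gelistirme-temelleri | homeworks/ytu/Bekir_Samet_Arslan/sifre_kirici.py | sifreyi_coz
-- ===== SOURCE A (Python) =====
-- def sifreyi_coz(sifreli_mesaj):
--     cozulmus_mesaj = ""
--     sayi_dizisi = ""
--     sayi_mod = False
--
--     for harf in sifreli_mesaj:
--         if harf.isdigit():
--             sayi_dizisi += harf
--             sayi_mod = True
--         else:
--             if sayi_mod:
--                 cozulmus_mesaj += sayi_dizisi[::-1]
--                 sayi_dizisi = ""
--                 sayi_mod = False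
--
--             if harf.isalpha():
--                 harf_sirasi = ord(harf)
--                 yeni_harf = chr(harf_sirasi - 5)
--
--                 if yeni_harf < 'a':
--                     yeni_harf = chr(ord(yeni_harf) + 26)
--
--                 cozulmus_mesaj += yeni_harf
--             else:
--                 cozulmus_mesaj += harf
--
--     if sayi_mod:
--         cozulmus_mesaj += sayi_dizisi[::-1]
--
--     return cozulmus_mesaj
-- ===== SOURCE B (Python) =====
-- def sifreyi_coz(sifreli_mesaj):
--     def harf_coz(c):
--         if c.isalpha():
--             y = chr(ord(c) - 5)
--             return chr(ord(y) + 26) if y < 'a' else y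
--         return c
--
--     parcalar = []
--     i = 0
--     n = len(sifreli_mesaj)
--     while i < n:
--         j = i
--         if sifreli_mesaj[i].isdigit():
--             while j < n and sifreli_mesaj[j].isdigit():
--                 j += 1
--             parcalar.append(sifreli_mesaj[i:j][::-1])
--         else:
--             while j < n and not sifreli_mesaj[j].isdigit():
--                 j += 1
--             parcalar.append(''.join(map(harf_coz, sifreli_mesaj[i:j])))
--         i = j
--     return ''.join(parcalar)
-- ===== Notes on version B (the rewrite author's own statement) =====
-- stated objective: alternative
-- what changed: Replaces A's stateful single-pass accumulator (pending-digit buffer plus a boolean mode flag) by run segmentation: scan maximal digit / non-digit runs and emit each run's transform (reversed digits, letter-shifted text), joining the pieces.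
import Mathlib
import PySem

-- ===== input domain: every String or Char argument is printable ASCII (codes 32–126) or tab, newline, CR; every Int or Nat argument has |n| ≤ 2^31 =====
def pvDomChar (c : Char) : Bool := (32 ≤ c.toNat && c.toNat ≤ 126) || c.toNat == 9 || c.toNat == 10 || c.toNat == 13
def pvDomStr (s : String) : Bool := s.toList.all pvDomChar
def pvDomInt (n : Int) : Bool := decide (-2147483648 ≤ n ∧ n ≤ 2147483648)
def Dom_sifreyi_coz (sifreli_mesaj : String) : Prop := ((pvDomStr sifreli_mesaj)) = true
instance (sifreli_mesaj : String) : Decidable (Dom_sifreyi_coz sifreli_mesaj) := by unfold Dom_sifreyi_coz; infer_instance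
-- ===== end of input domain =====

-- B replaces A's stateful accumulator (pending-digit buffer + mode flag) by run segmentation
-- (maximal digit / non-digit runs, each emitted transformed); same O(n) cost, different decomposition.

-- ===== PORT A =====
-- one loop step of A: state = (cozulmus_mesaj, sayi_dizisi, sayi_mod), over List Char
def pvStepA (st : List Char × List Char × Bool) (harf : Char) : List Char × List Char × Bool :=
  let (cozulmus, sayi, mod) := st
  if PySem.Chars.isdigit harf then
    (cozulmus, sayi ++ [harf], true)
  else
    let (cozulmus, sayi, _) :=
      if mod then (cozulmus ++ sayi.reverse, ([] : List Char), false) else (cozulmus, sayi, mod)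
    if PySem.Chars.isalpha harf then
      let yeni : Char := Char.ofNat (harf.toNat - 5)
      let yeni : Char := if yeni < 'a' then Char.ofNat (yeni.toNat + 26) else yeni
      (cozulmus ++ [yeni], sayi, false)
    else
      (cozulmus ++ [harf], sayi, false)

def sifreyi_coz (sifreli_mesaj : String) : String :=
  let st := sifreli_mesaj.toList.foldl pvStepA ([], [], false)
  String.ofList (if st.2.2 then st.1 ++ st.2.1.reverse else st.1)

-- ===== PORT B =====
-- harf_coz from Source B
def pvHarfCoz (c : Char) : Char :=
  if PySem.Chars.isalpha c then
    let y : Char := Char.ofNat (c.toNat - 5)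
    if y < 'a' then Char.ofNat (y.toNat + 26) else y
  else c

-- the run-segmentation loop of Source B: take a maximal digit run (emit reversed) or
-- a maximal non-digit run (emit letter-shifted), then continue after the run
def pvRunB : List Char → List Char
  | [] => []
  | c :: cs =>
    if PySem.Chars.isdigit c then
      (c :: cs.takeWhile PySem.Chars.isdigit).reverse ++ pvRunB (cs.dropWhile PySem.Chars.isdigit)
    else
      (c :: cs.takeWhile (fun x => !PySem.Chars.isdigit x)).map pvHarfCoz ++
        pvRunB (cs.dropWhile (fun x => !PySem.Chars.isdigit x))
termination_by cs => cs.length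
decreasing_by
  · exact Nat.lt_succ_of_le (List.length_dropWhile_le _ _)
  · exact Nat.lt_succ_of_le (List.length_dropWhile_le _ _)

def sifreyi_coz_alt (sifreli_mesaj : String) : String :=
  String.ofList (pvRunB sifreli_mesaj.toList)

-- ===== PRECONDITION & SPEC =====
def Spec_sifreyi_coz (sifreli_mesaj : String) (out : String) : Prop := out = sifreyi_coz_alt sifreli_mesaj
instance (sifreli_mesaj : String) (out : String) : Decidable (Spec_sifreyi_coz sifreli_mesaj out) := by unfold Spec_sifreyi_coz; infer_instance

-- ===== CLAIM (what is proved, stated in full; the proofs are below) =====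
def Claim_equal_sifreyi_coz : Prop := ∀ (sifreli_mesaj : String), Dom_sifreyi_coz sifreli_mesaj → Spec_sifreyi_coz sifreli_mesaj (sifreyi_coz sifreli_mesaj)

-- ===== LEMMAS AND PROOFS =====

-- splitting off the leading digit run of cs is a no-op for pvRunB
theorem pvRunB_digit_split (cs : List Char) :
    pvRunB cs = (cs.takeWhile PySem.Chars.isdigit).reverse ++ pvRunB (cs.dropWhile PySem.Chars.isdigit) := by
  cases cs with
  | nil => simp [pvRunB]
  | cons c cs =>
    by_cases h : PySem.Chars.isdigit c
    · rw [pvRunB, List.takeWhile_cons_of_pos h, List.dropWhile_cons_of_pos h]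
      simp [h]
    · rw [List.takeWhile_cons_of_neg h, List.dropWhile_cons_of_neg h]
      simp

-- a non-digit head is just shifted and consed
theorem pvRunB_cons_nondigit (c : Char) (cs : List Char) (h : ¬ PySem.Chars.isdigit c) :
    pvRunB (c :: cs) = pvHarfCoz c :: pvRunB cs := by
  rw [pvRunB]
  simp only [h, List.map_cons, List.cons_append]
  cases cs with
  | nil => simp [pvRunB]
  | cons d cs =>
    by_cases hd : PySem.Chars.isdigit d
    · rw [List.takeWhile_cons_of_neg (p := fun x => !PySem.Chars.isdigit x) (by simp [hd]),
          List.dropWhile_cons_of_neg (p := fun x => !PySem.Chars.isdigit x) (by simp [hd])]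
      simp
    · rw [List.takeWhile_cons_of_pos (p := fun x => !PySem.Chars.isdigit x) (by simp [hd]),
          List.dropWhile_cons_of_pos (p := fun x => !PySem.Chars.isdigit x) (by simp [hd]),
          pvRunB]
      simp [hd]

-- loop invariant: A's fold from state (o, d, d ≠ []) finishes as
-- o ++ (reversed pending-plus-continuing digit run) ++ B's output of the rest
theorem pvFoldA_eq (cs : List Char) : ∀ (o d : List Char),
    (let st := cs.foldl pvStepA (o, d, !d.isEmpty)
     if st.2.2 then st.1 ++ st.2.1.reverse else st.1) =
      o ++ (cs.takeWhile PySem.Chars.isdigit).reverse ++ d.reverse ++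
        pvRunB (cs.dropWhile PySem.Chars.isdigit) := by
  induction cs with
  | nil =>
    intro o d
    cases d <;> simp [pvRunB]
  | cons c cs ih =>
    intro o d
    by_cases h : PySem.Chars.isdigit c
    · have step : pvStepA (o, d, !d.isEmpty) c = (o, d ++ [c], true) := by
        simp [pvStepA, h]
      rw [List.foldl_cons, step]
      have ih' := ih o (d ++ [c])
      have e : (!(d ++ [c]).isEmpty) = true := by simp
      rw [e] at ih'
      rw [ih', List.takeWhile_cons_of_pos h, List.dropWhile_cons_of_pos h]
      simp
    · have step : pvStepA (o, d, !d.isEmpty) c = (o ++ d.reverse ++ [pvHarfCoz c], [], false) := by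
        cases d <;> simp [pvStepA, pvHarfCoz, h] <;> split <;> simp
      rw [List.foldl_cons, step]
      have ih' := ih (o ++ d.reverse ++ [pvHarfCoz c]) []
      simp only [List.isEmpty_nil, Bool.not_true] at ih'
      rw [ih',
          List.takeWhile_cons_of_neg h, List.dropWhile_cons_of_neg h,
          pvRunB_cons_nondigit c cs h, pvRunB_digit_split cs]
      simp

-- ===== VERDICT (by name: the statement is the Claim_ definition above) =====
theorem sifreyi_coz_spec : Claim_equal_sifreyi_coz := by
  intro s _
  show sifreyi_coz s = sifreyi_coz_alt s
  have h := pvFoldA_eq s.toList [] []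
  simp only [List.isEmpty_nil, Bool.not_true] at h
  show String.ofList (let st := s.toList.foldl pvStepA ([], [], false)
        if st.2.2 then st.1 ++ st.2.1.reverse else st.1) = String.ofList (pvRunB s.toList)
  rw [h]
  simp only [List.nil_append, List.reverse_nil, List.append_nil]
  rw [← pvRunB_digit_split]
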